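-- pv_equiv track=rewrite | github.com/ic-crc/SAFE-Tool | hrdem/cdem.py | clustering_algorithm
-- ===== SOURCE A (Python) =====
-- def clustering_algorithm(points, eps = 1):
--     clusters = []
--     if points:
--         curr_point = points[0]
--         curr_cluster = [curr_point]
--         for point in points[1:]:
--             if point <= curr_point + eps:
--                 curr_cluster.append(point)
--             else:
--                 clusters.append(curr_cluster)
--                 curr_cluster = [point]
--             curr_point = point
--         clusters.append(curr_cluster)
--
--     return clusters
-- ===== SOURCE B (Python) =====
-- def clustering_algorithm(points, eps = 1):
--     if not points:
--         return []
--     bounds = [i for i, (prev, nxt) in enumerate(zip(points, points[1:]), 1) if nxt > prev + eps]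
--     edges = [0] + bounds + [len(points)]
--     return [points[a:b] for a, b in zip(edges, edges[1:])]
-- ===== Notes on version B (the rewrite author's own statement) =====
-- stated objective: alternative
-- what changed: Replaces A's single stateful pass (mutable current cluster, current point, running cluster list) by a two-phase decomposition: first collect the boundary indices where a point exceeds its predecessor plus eps, then slice the list at those boundaries.
import Mathlib
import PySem

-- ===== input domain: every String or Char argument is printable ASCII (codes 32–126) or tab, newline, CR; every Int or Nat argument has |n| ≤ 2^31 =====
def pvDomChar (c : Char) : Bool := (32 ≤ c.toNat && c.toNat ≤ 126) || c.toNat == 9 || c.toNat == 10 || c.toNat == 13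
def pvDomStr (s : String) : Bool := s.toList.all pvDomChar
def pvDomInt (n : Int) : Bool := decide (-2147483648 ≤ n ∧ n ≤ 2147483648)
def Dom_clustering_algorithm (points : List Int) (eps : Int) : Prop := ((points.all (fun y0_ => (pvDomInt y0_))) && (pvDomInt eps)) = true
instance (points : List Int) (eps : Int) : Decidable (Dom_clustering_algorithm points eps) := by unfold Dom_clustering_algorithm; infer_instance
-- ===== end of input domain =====

-- B replaces A's single stateful pass by a two-phase decomposition (collect boundary indices, then slice); equal return value proved.


-- ===== PORT A =====
-- body of A's for-loop; state = (clusters, curr_cluster, curr_point)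
def stepA (eps : Int) (st : List (List Int) × List Int × Int) (point : Int) :
    List (List Int) × List Int × Int :=
  if point ≤ st.2.2 + eps then (st.1, st.2.1 ++ [point], point)
  else (st.1 ++ [st.2.1], [point], point)

def clustering_algorithm (points : List Int) (eps : Int) : List (List Int) :=
  match points with
  | [] => []
  | p :: _ =>
    let r := (PySem.List.slice points (some 1) none).foldl (stepA eps) ([], [p], p)
    r.1 ++ [r.2.1]

-- ===== PORT B =====
-- bounds = [i for i, (prev, nxt) in enumerate(zip(points, points[1:]), 1) if nxt > prev + eps]
def altBounds (points : List Int) (eps : Int) : List Int :=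
  ((PySem.List.enumerate (points.zip (PySem.List.slice points (some 1) none)) 1).filter
      (fun x => x.2.1 + eps < x.2.2)).map (·.1)

-- edges = [0] + bounds + [len(points)]
def altEdges (points : List Int) (eps : Int) : List Int :=
  0 :: altBounds points eps ++ [(points.length : Int)]

def clustering_algorithm_alt (points : List Int) (eps : Int) : List (List Int) :=
  if points = [] then []
  else
    ((altEdges points eps).zip (altEdges points eps).tail).map
      (fun ab => PySem.List.slice points (some ab.1) (some ab.2))

-- ===== PRECONDITION & SPEC =====
def Spec_clustering_algorithm (points : List Int) (eps : Int) (out : List (List Int)) : Prop := out = clustering_algorithm_alt points eps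
instance (points : List Int) (eps : Int) (out : List (List Int)) : Decidable (Spec_clustering_algorithm points eps out) := by unfold Spec_clustering_algorithm; infer_instance

-- ===== CLAIM (what is proved, stated in full; the proofs are below) =====
def Claim_equal_clustering_algorithm : Prop := ∀ (points : List Int) (eps : Int), Dom_clustering_algorithm points eps → Spec_clustering_algorithm points eps (clustering_algorithm points eps)

-- ===== LEMMAS AND PROOFS =====

/-- Prepend `x` to the first cluster (or start one). -/
def consHd (x : Int) : List (List Int) → List (List Int)
  | [] => [[x]]
  | c :: r => (x :: c) :: r

/-- A's run from an empty cluster list. -/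
def runA (eps : Int) (cur : List Int) (cp : Int) (l : List Int) : List (List Int) :=
  (l.foldl (stepA eps) ([], cur, cp)).1 ++ [(l.foldl (stepA eps) ([], cur, cp)).2.1]

lemma runA_acc (eps : Int) : ∀ (l : List Int) (cs : List (List Int)) (cur : List Int) (cp : Int),
    (l.foldl (stepA eps) (cs, cur, cp)).1 ++ [(l.foldl (stepA eps) (cs, cur, cp)).2.1]
      = cs ++ runA eps cur cp l := by
  intro l
  induction l with
  | nil => intro cs cur cp; simp [runA]
  | cons p rest ih =>
    intro cs cur cp
    simp only [runA, List.foldl_cons, stepA]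
    split_ifs with h
    · rw [ih, ih]; simp
    · rw [ih, ih]; simp

lemma runA_consHd (eps : Int) : ∀ (l : List Int) (cur : List Int) (cp x : Int),
    runA eps (x :: cur) cp l = consHd x (runA eps cur cp l) := by
  intro l
  induction l with
  | nil => intro cur cp x; simp [runA, consHd]
  | cons p rest ih =>
    intro cur cp x
    simp only [runA, List.foldl_cons, stepA]
    split_ifs with h
    · have := ih (cur ++ [p]) p x
      simpa [runA] using this
    · rw [runA_acc, runA_acc]
      simp [consHd]

lemma A_cons (eps p : Int) (l : List Int) :
    clustering_algorithm (p :: l) eps = runA eps [p] p l := by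
  simp [clustering_algorithm, runA, PySem.List.slice_from_one]

lemma A_rec (p q : Int) (t : List Int) (eps : Int) :
    clustering_algorithm (p :: q :: t) eps
      = if q ≤ p + eps then consHd p (clustering_algorithm (q :: t) eps)
        else [p] :: clustering_algorithm (q :: t) eps := by
  rw [A_cons, A_cons]
  by_cases h : q ≤ p + eps
  · rw [if_pos h]
    have h1 : runA eps [p] p (q :: t) = runA eps (p :: [q]) q t := by
      simp [runA, stepA, h]
    rw [h1, runA_consHd]
  · rw [if_neg h]
    show ((q :: t).foldl (stepA eps) ([], [p], p)).1 ++ [((q :: t).foldl (stepA eps) ([], [p], p)).2.1]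
        = [p] :: runA eps [q] q t
    rw [List.foldl_cons]
    simp only [stepA, if_neg h]
    rw [runA_acc]
    simp

/-- Enumerate shift. -/
lemma enumerate_shift {α : Type} : ∀ (xs : List α) (s : Int),
    PySem.List.enumerate xs (s + 1) = (PySem.List.enumerate xs s).map (fun y => (y.1 + 1, y.2)) := by
  intro xs
  induction xs with
  | nil => intro s; simp [PySem.List.enumerate_nil]
  | cons x xs ih =>
    intro s
    rw [PySem.List.enumerate_cons, PySem.List.enumerate_cons, List.map_cons]
    rw [show s + 1 + 1 = (s + 1) + 1 by ring, ih (s + 1)]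

lemma altBounds_nonneg (l : List Int) (eps : Int) : ∀ x ∈ altBounds l eps, 1 ≤ x := by
  intro x hx
  simp only [altBounds, List.mem_map, List.mem_filter] at hx
  obtain ⟨y, ⟨hy, _⟩, rfl⟩ := hx
  have hmem : y.1 ∈ (PySem.List.enumerate (l.zip (PySem.List.slice l (some 1) none)) 1).map (·.1) :=
    List.mem_map_of_mem hy
  rw [PySem.List.map_fst_enumerate] at hmem
  exact ((PySem.List.mem_pyRange_one).1 hmem).1

lemma altBounds_cons (p q : Int) (t : List Int) (eps : Int) :
    altBounds (p :: q :: t) eps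
      = (if p + eps < q then [1] else []) ++ (altBounds (q :: t) eps).map (· + 1) := by
  unfold altBounds
  rw [PySem.List.slice_from_one, PySem.List.slice_from_one]
  simp only [List.tail_cons, List.zip_cons_cons, PySem.List.enumerate_cons]
  rw [enumerate_shift]
  by_cases h : p + eps < q
  · simp [h, List.filter_map, List.map_map, Function.comp_def]
  · simp [h, List.filter_map, List.map_map, Function.comp_def]

def pairSlices (points : List Int) (es : List Int) : List (List Int) :=
  (es.zip es.tail).map (fun ab => PySem.List.slice points (some ab.1) (some ab.2))

lemma alt_eq (points : List Int) (eps : Int) (h : points ≠ []) :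
    clustering_algorithm_alt points eps = pairSlices points (altEdges points eps) := by
  simp [clustering_algorithm_alt, pairSlices, h]

lemma pairSlices_cons (pts : List Int) (a b : Int) (rest : List Int) :
    pairSlices pts (a :: b :: rest) = PySem.List.slice pts (some a) (some b) :: pairSlices pts (b :: rest) := by
  simp [pairSlices]

lemma pairSlices_shift (p : Int) (l : List Int) (es : List Int)
    (hes : ∀ x ∈ es, 0 ≤ x) :
    pairSlices (p :: l) (es.map (· + 1)) = pairSlices l es := by
  unfold pairSlices
  rw [← List.map_tail, List.zip_map, List.map_map]
  apply List.map_congr_left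
  intro ab hab
  obtain ⟨ha, hb⟩ := List.of_mem_zip hab
  have h1 : 0 ≤ ab.1 := hes _ ha
  have h2 : 0 ≤ ab.2 := hes _ (List.mem_of_mem_tail hb)
  simp only [Function.comp_def, Prod.map]
  rw [PySem.List.slice_toNat _ (by omega) (by omega), PySem.List.slice_toNat _ h1 h2]
  have e1 : (ab.1 + 1).toNat = ab.1.toNat + 1 := by omega
  have e2 : (ab.2 + 1).toNat = ab.2.toNat + 1 := by omega
  rw [e1, e2]
  simp [Nat.succ_sub_succ]

lemma pairSlices_head_shift (p : Int) (l : List Int) (es : List Int) (hne : es ≠ [])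
    (hes : ∀ x ∈ es, 0 ≤ x) :
    pairSlices (p :: l) (0 :: es.map (· + 1)) = consHd p (pairSlices l (0 :: es)) := by
  obtain ⟨e, es', rfl⟩ := List.exists_cons_of_ne_nil hne
  have he : (0 : Int) ≤ e := hes e (by simp)
  rw [List.map_cons, pairSlices_cons, pairSlices_cons]
  have htail : pairSlices (p :: l) ((e + 1) :: es'.map (· + 1)) = pairSlices l (e :: es') := by
    have := pairSlices_shift p l (e :: es') hes
    simpa using this
  rw [htail]
  simp only [consHd]
  rw [PySem.List.slice_toNat _ le_rfl (by omega : (0:Int) ≤ e + 1),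
      PySem.List.slice_toNat _ le_rfl he]
  have he1 : (e + 1).toNat = e.toNat + 1 := by omega
  simp [he1]

lemma pairSlices_new_shift (p : Int) (l : List Int) (es : List Int)
    (hes : ∀ x ∈ es, 0 ≤ x) :
    pairSlices (p :: l) (0 :: (0 :: es).map (· + 1)) = [p] :: pairSlices l (0 :: es) := by
  have hshift := pairSlices_shift p l (0 :: es) (by
    intro x hx
    rcases List.mem_cons.1 hx with rfl | hx
    · exact le_rfl
    · exact hes x hx)
  simp only [List.map_cons] at hshift ⊢
  norm_num at hshift ⊢
  rw [pairSlices_cons, hshift]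
  rw [PySem.List.slice_toNat _ le_rfl (by omega : (0:Int) ≤ 1)]
  norm_num

lemma B_rec (p q : Int) (t : List Int) (eps : Int) :
    clustering_algorithm_alt (p :: q :: t) eps
      = if q ≤ p + eps then consHd p (clustering_algorithm_alt (q :: t) eps)
        else [p] :: clustering_algorithm_alt (q :: t) eps := by
  rw [alt_eq _ _ (by simp), alt_eq _ _ (by simp)]
  have hnn : ∀ x ∈ altBounds (q :: t) eps ++ [((q :: t).length : Int)], 0 ≤ x := by
    intro x hx
    rcases List.mem_append.1 hx with hx | hx
    · exact le_trans (by norm_num) (altBounds_nonneg _ _ x hx)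
    · rw [List.mem_singleton.1 hx]; exact Int.natCast_nonneg _
  unfold altEdges
  rw [altBounds_cons]
  by_cases h : q ≤ p + eps
  · rw [if_neg (by omega), if_pos h, List.nil_append]
    simp only [List.cons_append]
    have hE : (altBounds (q :: t) eps).map (· + 1) ++ [((p :: q :: t).length : Int)]
        = (altBounds (q :: t) eps ++ [((q :: t).length : Int)]).map (· + 1) := by
      rw [List.map_append]
      simp only [List.map_cons, List.map_nil, List.length_cons]
      push_cast
      norm_num
    rw [hE, pairSlices_head_shift p (q :: t) _ (by simp) hnn]
  · rw [if_pos (by omega), if_neg h]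
    simp only [List.cons_append]
    have hE : ((1:Int) :: ([] ++ (altBounds (q :: t) eps).map (· + 1) ++ [((p :: q :: t).length : Int)]))
        = ((0 : Int) :: (altBounds (q :: t) eps ++ [((q :: t).length : Int)])).map (· + 1) := by
      simp only [List.nil_append, List.map_cons, List.map_append, List.map_nil, List.length_cons]
      push_cast
      norm_num
    rw [hE, pairSlices_new_shift p (q :: t) _ hnn]

lemma A_single (p eps : Int) : clustering_algorithm [p] eps = [[p]] := by
  simp [clustering_algorithm, PySem.List.slice_from_one]

lemma B_single (p eps : Int) : clustering_algorithm_alt [p] eps = [[p]] := by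
  rw [alt_eq _ _ (by simp)]
  have hE : altEdges [p] eps = [0, 1] := by
    simp [altEdges, altBounds, PySem.List.slice_from_one, PySem.List.enumerate_nil]
  rw [hE, pairSlices_cons]
  have : pairSlices [p] [1] = [] := by simp [pairSlices]
  rw [this]
  rw [PySem.List.slice_toNat _ le_rfl (by omega : (0:Int) ≤ 1)]
  norm_num

theorem AB_eq : ∀ (points : List Int) (eps : Int),
    clustering_algorithm points eps = clustering_algorithm_alt points eps
  | [], eps => by simp [clustering_algorithm, clustering_algorithm_alt]
  | [p], eps => by rw [A_single, B_single]
  | p :: q :: t, eps => by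
    rw [A_rec, B_rec, AB_eq (q :: t) eps]

-- ===== VERDICT (by name: the statement is the Claim_ definition above) =====
theorem clustering_algorithm_spec : Claim_equal_clustering_algorithm := by
  intro points eps _
  unfold Spec_clustering_algorithm
  exact AB_eq points eps
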